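-- pv_equiv track=rewrite | github.com/AthharPro/zypher | python-scanner/zypher_scanner/db_ruls/cicd-vuln-007.py | _find_job_services_line
-- ===== SOURCE A (Python) =====
-- from typing import List, Dict, Any
--
-- def _find_job_services_line(file_lines: List[str], job_name: str, service_index: int) -> int:
--     job_line = -1
--     services_line = -1
--     service_count = -1
--     for i, line in enumerate(file_lines):
--         if line.strip().startswith(f"{job_name}:"):
--             job_line = i
--             break
--     if job_line < 0:
--         return -1
--     for i in range(job_line, len(file_lines)):
--         if "services:" in file_lines[i]:
--             services_line = i
--             break
--     if services_line < 0:
--         return -1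
--     for i in range(services_line + 1, len(file_lines)):
--         if file_lines[i].strip().startswith("- "):
--             service_count += 1
--             if service_count == service_index:
--                 return i
--     return -1
-- ===== SOURCE B (Python) =====
-- def _find_job_services_line(file_lines, job_name, service_index):
--     # Single pass state machine: 0 = seek job header, 1 = seek 'services:', 2 = count '- ' entries.
--     state = 0
--     count = -1
--     for i, line in enumerate(file_lines):
--         if state == 0 and line.strip().startswith(job_name + ":"):
--             state = 1
--         if state == 1:
--             if "services:" in line:
--                 state = 2  # counting starts strictly after this line
--         elif state == 2:
--             if line.strip().startswith("- "):
--                 count += 1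
--                 if count == service_index:
--                     return i
--     return -1
-- ===== Notes on version B (the rewrite author's own statement) =====
-- stated objective: alternative
-- what changed: Replaced A's three sequential index-based scans (find job line, re-scan from it for 'services:', re-scan after that counting '- ' items) by a single pass over enumerate(file_lines) with an explicit three-state machine that re-examines the job line on the job->services transition.
import Mathlib
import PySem

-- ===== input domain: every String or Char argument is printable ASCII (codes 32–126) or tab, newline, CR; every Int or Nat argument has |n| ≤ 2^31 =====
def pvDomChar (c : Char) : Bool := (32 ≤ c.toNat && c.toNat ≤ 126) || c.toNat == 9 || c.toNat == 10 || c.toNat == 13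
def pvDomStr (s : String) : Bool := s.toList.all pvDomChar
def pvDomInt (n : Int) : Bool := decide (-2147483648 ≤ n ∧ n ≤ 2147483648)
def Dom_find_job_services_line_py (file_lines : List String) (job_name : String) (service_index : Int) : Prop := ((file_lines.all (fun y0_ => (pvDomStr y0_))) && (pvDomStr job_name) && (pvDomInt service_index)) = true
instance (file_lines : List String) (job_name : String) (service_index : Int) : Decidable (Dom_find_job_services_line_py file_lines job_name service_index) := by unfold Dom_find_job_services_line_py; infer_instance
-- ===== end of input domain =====

-- B is a single-pass three-state machine over enumerate(file_lines) instead of A's three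
-- sequential index-based scans; same O(n) cost, different decomposition (objective: alternative).

-- ===== PORT A =====
-- first loop of A: index of first line whose strip starts with job_name + ":" (-1 if none)
def pvAFindJob (lines : List String) (job_name : String) (i : Nat) : Int :=
  match lines with
  | [] => -1
  | l :: rest =>
    if PySem.Str.startswith (PySem.Str.strip l) (job_name ++ ":") then (i : Int)
    else pvAFindJob rest job_name (i + 1)

-- second loop of A: from job_line on, index of first line containing "services:" (-1 if none)
def pvAFindServices (lines : List String) (i : Nat) : Int :=
  match lines with
  | [] => -1
  | l :: rest =>
    if PySem.Str.isIn "services:" l then (i : Int)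
    else pvAFindServices rest (i + 1)

-- third loop of A: count "- " lines after services_line, return index of the service_index-th
def pvACount (lines : List String) (i : Nat) (count : Int) (service_index : Int) : Int :=
  match lines with
  | [] => -1
  | l :: rest =>
    if PySem.Str.startswith (PySem.Str.strip l) "- " then
      if count + 1 = service_index then (i : Int)
      else pvACount rest (i + 1) (count + 1) service_index
    else pvACount rest (i + 1) count service_index

def find_job_services_line_py (file_lines : List String) (job_name : String) (service_index : Int) : Int :=
  let job_line : Int := pvAFindJob file_lines job_name 0
  if job_line < 0 then -1
  else
    let services_line : Int := pvAFindServices (file_lines.drop job_line.toNat) job_line.toNat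
    if services_line < 0 then -1
    else pvACount (file_lines.drop (services_line.toNat + 1)) (services_line.toNat + 1) (-1) service_index

-- ===== PORT B =====
-- single pass; state 0 = seek job header, 1 = seek "services:", 2 = count "- " entries
def pvBLoop (job_name : String) (service_index : Int) (lines : List String) (i : Nat) (state : Nat) (count : Int) : Int :=
  match lines with
  | [] => -1
  | l :: rest =>
    let state := if state = 0 ∧ PySem.Str.startswith (PySem.Str.strip l) (job_name ++ ":") then 1 else state
    if state = 1 then
      if PySem.Str.isIn "services:" l then pvBLoop job_name service_index rest (i + 1) 2 count
      else pvBLoop job_name service_index rest (i + 1) 1 count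
    else if state = 2 then
      if PySem.Str.startswith (PySem.Str.strip l) "- " then
        if count + 1 = service_index then (i : Int)
        else pvBLoop job_name service_index rest (i + 1) 2 (count + 1)
      else pvBLoop job_name service_index rest (i + 1) 2 count
    else pvBLoop job_name service_index rest (i + 1) state count

def find_job_services_line_py_alt (file_lines : List String) (job_name : String) (service_index : Int) : Int :=
  pvBLoop job_name service_index file_lines 0 0 (-1)

-- ===== PRECONDITION & SPEC =====
def Spec_find_job_services_line_py (file_lines : List String) (job_name : String) (service_index : Int) (out : Int) : Prop := out = find_job_services_line_py_alt file_lines job_name service_index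
instance (file_lines : List String) (job_name : String) (service_index : Int) (out : Int) : Decidable (Spec_find_job_services_line_py file_lines job_name service_index out) := by unfold Spec_find_job_services_line_py; infer_instance

-- ===== CLAIM (what is proved, stated in full; the proofs are below) =====
def Claim_equal_find_job_services_line_py : Prop := ∀ (file_lines : List String) (job_name : String) (service_index : Int), Dom_find_job_services_line_py file_lines job_name service_index → Spec_find_job_services_line_py file_lines job_name service_index (find_job_services_line_py file_lines job_name service_index)

-- ===== LEMMAS AND PROOFS =====

-- A's result after the services scan, as a function of the services-scan result s
def pvARest (fl : List String) (service_index : Int) (s : Int) : Int :=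
  if s < 0 then -1
  else pvACount (fl.drop (s.toNat + 1)) (s.toNat + 1) (-1) service_index

-- one-step unfolding of pvBLoop in each state
lemma pvB_cons2 (jn l : String) (si c : Int) (rest : List String) (i : Nat) :
    pvBLoop jn si (l :: rest) i 2 c =
      if PySem.Str.startswith (PySem.Str.strip l) "- " then
        if c + 1 = si then (i : Int) else pvBLoop jn si rest (i + 1) 2 (c + 1)
      else pvBLoop jn si rest (i + 1) 2 c := by
  simp [pvBLoop]

lemma pvB_cons1 (jn l : String) (si c : Int) (rest : List String) (i : Nat) :
    pvBLoop jn si (l :: rest) i 1 c =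
      if PySem.Str.isIn "services:" l then pvBLoop jn si rest (i + 1) 2 c
      else pvBLoop jn si rest (i + 1) 1 c := by
  simp [pvBLoop]

lemma pvB_cons0 (jn l : String) (si c : Int) (rest : List String) (i : Nat) :
    pvBLoop jn si (l :: rest) i 0 c =
      if PySem.Str.startswith (PySem.Str.strip l) (jn ++ ":") then
        (if PySem.Str.isIn "services:" l then pvBLoop jn si rest (i + 1) 2 c
         else pvBLoop jn si rest (i + 1) 1 c)
      else pvBLoop jn si rest (i + 1) 0 c := by
  by_cases h : PySem.Chars.startswith (PySem.Chars.strip l.toList) (jn.toList ++ [':']) = true <;>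
    simp [pvBLoop, h]

lemma pvB_state2 (jn : String) (si : Int) (ls : List String) :
    ∀ (i : Nat) (c : Int), pvBLoop jn si ls i 2 c = pvACount ls i c si := by
  induction ls with
  | nil => intro i c; rfl
  | cons l rest ih =>
    intro i c
    rw [pvB_cons2, pvACount]
    by_cases h : PySem.Str.startswith (PySem.Str.strip l) "- "
    · rw [if_pos h, if_pos h]
      by_cases hc : c + 1 = si
      · rw [if_pos hc, if_pos hc]
      · rw [if_neg hc, if_neg hc, ih]
    · rw [if_neg h, if_neg h, ih]

lemma pvB_state1 (fl : List String) (jn : String) (si : Int) (ls : List String) :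
    ∀ (i : Nat), fl.drop i = ls →
      pvBLoop jn si ls i 1 (-1) = pvARest fl si (pvAFindServices ls i) := by
  induction ls with
  | nil => intro i _; simp [pvBLoop, pvAFindServices, pvARest]
  | cons l rest ih =>
    intro i hdrop
    have hrest : fl.drop (i + 1) = rest := by
      rw [← List.tail_drop, hdrop, List.tail_cons]
    rw [pvB_cons1, pvAFindServices]
    by_cases hs : PySem.Str.isIn "services:" l
    · rw [if_pos hs, if_pos hs, pvB_state2, pvARest,
        if_neg (by omega : ¬ ((i : Int) < 0)), Int.toNat_natCast, hrest]
    · rw [if_neg hs, if_neg hs, ih (i + 1) hrest]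

lemma pvB_state0 (fl : List String) (jn : String) (si : Int) (ls : List String) :
    ∀ (i : Nat), fl.drop i = ls →
      pvBLoop jn si ls i 0 (-1) =
        (if pvAFindJob ls jn i < 0 then -1
         else pvARest fl si
           (pvAFindServices (fl.drop (pvAFindJob ls jn i).toNat) (pvAFindJob ls jn i).toNat)) := by
  induction ls with
  | nil => intro i _; simp [pvBLoop, pvAFindJob]
  | cons l rest ih =>
    intro i hdrop
    have hrest : fl.drop (i + 1) = rest := by
      rw [← List.tail_drop, hdrop, List.tail_cons]
    rw [pvB_cons0, pvAFindJob]
    by_cases hj : PySem.Str.startswith (PySem.Str.strip l) (jn ++ ":")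
    · -- job found at line i; B re-examines the same line in state 1
      rw [if_pos hj, if_pos hj, if_neg (by omega : ¬ ((i : Int) < 0)), Int.toNat_natCast,
        hdrop, pvAFindServices]
      by_cases hs : PySem.Str.isIn "services:" l
      · rw [if_pos hs, if_pos hs, pvB_state2, pvARest,
          if_neg (by omega : ¬ ((i : Int) < 0)), Int.toNat_natCast, hrest]
      · rw [if_neg hs, if_neg hs, pvB_state1 fl jn si rest (i + 1) hrest]
    · rw [if_neg hj, if_neg hj, ih (i + 1) hrest]

-- ===== VERDICT (by name: the statement is the Claim_ definition above) =====
theorem find_job_services_line_py_spec : Claim_equal_find_job_services_line_py := by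
  intro fl jn si _
  unfold Spec_find_job_services_line_py find_job_services_line_py find_job_services_line_py_alt
  rw [pvB_state0 fl jn si fl 0 (by simp)]
  by_cases hj : pvAFindJob fl jn 0 < 0
  · rw [if_pos hj, if_pos hj]
  · rw [if_neg hj, if_neg hj, pvARest]
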